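-- pv_equiv track=rewrite | github.com/martiansideofthemoon/diversity-sampling | language-generation/utils/fix_raw.py | process_char
-- ===== SOURCE A (Python) =====
-- def process_char(data):
--     """Convert a word string into corresponding char string."""
--     data = data.replace(" ", "_")
--     sentences = data.split("\n")
--     output = ""
--     spc = []
--     for i, x in enumerate(sentences):
--         spc.append(" ".join(list(x)))
--     output = "\n".join(spc)
--     return output
-- ===== SOURCE B (Python) =====
-- def process_char(data):
--     """Convert a word string into corresponding char string."""
--     data = data.replace(" ", "_")
--     out = []
--     line_start = True
--     for ch in data:
--         if ch == "\n":
--             out.append("\n")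
--             line_start = True
--         else:
--             if not line_start:
--                 out.append(" ")
--             out.append(ch)
--             line_start = False
--     return "".join(out)
-- ===== Notes on version B (the rewrite author's own statement) =====
-- stated objective: alternative
-- what changed: Replaces the split-per-line then join-of-joins pipeline with a single left-to-right scan that emits a space before each character unless at a line start, tracking line starts with one boolean.
import Mathlib
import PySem

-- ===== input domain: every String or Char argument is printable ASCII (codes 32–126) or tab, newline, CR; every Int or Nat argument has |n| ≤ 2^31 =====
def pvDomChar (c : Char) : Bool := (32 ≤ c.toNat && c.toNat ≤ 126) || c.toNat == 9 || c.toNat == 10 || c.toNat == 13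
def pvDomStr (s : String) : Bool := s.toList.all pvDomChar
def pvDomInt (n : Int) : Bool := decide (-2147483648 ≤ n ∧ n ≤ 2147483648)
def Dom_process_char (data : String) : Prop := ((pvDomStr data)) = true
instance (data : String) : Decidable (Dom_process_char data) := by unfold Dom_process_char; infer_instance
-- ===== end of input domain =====

-- B: single left-to-right scan tracking line starts, instead of A's split-per-line and join-of-joins (alternative decomposition, same result).


-- ===== PORT A =====
-- data.replace(" ", "_"); sentences = data.split("\n"); for i, x in enumerate(sentences):
-- spc.append(" ".join(list(x))); output = "\n".join(spc)
def process_char (data : String) : String :=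
  String.ofList (PySem.Chars.join ['\n']
    ((PySem.List.enumerate
        (PySem.Chars.splitOn (PySem.Str.replace data " " "_").toList ['\n'])).foldl
      (fun acc p => acc ++ [PySem.Chars.join [' '] (p.2.map (fun c => [c]))]) []))

-- ===== PORT B =====
-- data.replace(" ", "_"); one pass: out char list + line_start boolean; "".join(out)
def process_char_alt (data : String) : String :=
  String.ofList
    (((PySem.Str.replace data " " "_").toList.foldl
        (fun (st : List Char × Bool) ch =>
          if ch = '\n' then (st.1 ++ ['\n'], true)
          else ((st.1 ++ (if st.2 then [] else [' '])) ++ [ch], false))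
        ([], true)).1)

-- ===== PRECONDITION & SPEC =====
def Spec_process_char (data : String) (out : String) : Prop := out = process_char_alt data
instance (data : String) (out : String) : Decidable (Spec_process_char data out) := by unfold Spec_process_char; infer_instance

-- ===== CLAIM (what is proved, stated in full; the proofs are below) =====
def Claim_equal_process_char : Prop := ∀ (data : String), Dom_process_char data → Spec_process_char data (process_char data)

-- ===== LEMMAS AND PROOFS =====
-- pvSplitNL: structural form of split("\n"); pvScan: B's scan; pvG: " ".join(list(x)).
def pvSplitNL : List Char → List (List Char)
  | [] => [[]]
  | c :: cs => if c = '\n' then [] :: pvSplitNL cs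
               else (c :: (pvSplitNL cs).headI) :: (pvSplitNL cs).tail

theorem pvSplitNL_ne_nil (l : List Char) : pvSplitNL l ≠ [] := by
  cases l with
  | nil => simp [pvSplitNL]
  | cons c cs => simp only [pvSplitNL]; split <;> simp

theorem pv_modifyHead_eta {α : Type} (l : List α) : List.modifyHead (fun x => x) l = l := by
  cases l <;> simp

theorem pv_split_go : ∀ (fuel : Nat) (l cur : List Char) (acc : List (List Char)), l.length ≤ fuel →
    PySem.Chars.splitOn.go ['\n'] fuel l cur acc
      = acc.reverse ++ (pvSplitNL l).modifyHead (cur.reverse ++ ·) := by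
  intro fuel
  induction fuel with
  | zero => intro l cur acc h; simp at h; subst h; simp [PySem.Chars.splitOn.go, pvSplitNL]
  | succ f ih =>
    intro l cur acc h
    cases l with
    | nil => simp [PySem.Chars.splitOn.go, pvSplitNL]
    | cons c t =>
      rw [PySem.Chars.splitOn.go]
      by_cases hc : c = '\n'
      · subst hc
        simp [List.isPrefixOf, ih t _ _ (by simpa using h), pvSplitNL, pv_modifyHead_eta]
      · have hc' : ¬ ('\n' = c) := fun h => hc h.symm
        rw [ih t _ _ (by simpa using h)]
        simp only [List.isPrefixOf, pvSplitNL, hc]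
        simp [hc']
        obtain ⟨a, as, ha⟩ := List.exists_cons_of_ne_nil (pvSplitNL_ne_nil t)
        simp [ha]

theorem pv_splitOn_eq (l : List Char) :
    PySem.Chars.splitOn l ['\n'] = pvSplitNL l := by
  rw [PySem.Chars.splitOn]
  rw [pv_split_go (l.length + 1) l [] [] (by omega)]
  simp [pv_modifyHead_eta]

def pvG (x : List Char) : List Char := PySem.Chars.join [' '] (x.map (fun c => [c]))

def pvScan : List Char → Bool → List Char
  | [], _ => []
  | c :: cs, ls =>
      if c = '\n' then '\n' :: pvScan cs true
      else (if ls then [c] else [' ', c]) ++ pvScan cs false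

theorem pv_join_cons (sep : List Char) (x : List Char) (rest : List (List Char)) :
    PySem.Chars.join sep (x :: rest)
      = x ++ (if rest = [] then [] else sep ++ PySem.Chars.join sep rest) := by
  cases rest <;> simp [PySem.Chars.join, List.intercalate]

theorem pvG_cons (c : Char) (h : List Char) :
    pvG (c :: h) = c :: (if h = [] then [] else ' ' :: pvG h) := by
  cases h <;> simp [pvG, PySem.Chars.join, List.intercalate]

theorem pvG_nil : pvG [] = [] := by
  simp [pvG, PySem.Chars.join, List.intercalate]

theorem pv_main2 : ∀ l : List Char,
    PySem.Chars.join ['\n'] ((pvSplitNL l).map pvG) = pvScan l true ∧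
    ∀ c : Char, c ≠ '\n' →
      PySem.Chars.join ['\n'] ((pvSplitNL (c :: l)).map pvG) = c :: pvScan l false := by
  intro l
  induction l with
  | nil =>
    constructor
    · simp [pvSplitNL, pvScan, pvG, PySem.Chars.join, List.intercalate]
    · intro c hc
      simp [pvSplitNL, hc, pvScan, pvG, PySem.Chars.join, List.intercalate]
  | cons d ds ih =>
    obtain ⟨ih1, ih2⟩ := ih
    by_cases hd : d = '\n'
    · subst hd
      have hne : (pvSplitNL ds).map pvG ≠ [] := by simp [pvSplitNL_ne_nil]
      constructor
      · have h1 : pvSplitNL ('\n' :: ds) = [] :: pvSplitNL ds := by simp [pvSplitNL]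
        rw [h1, List.map_cons, pv_join_cons, if_neg hne, pvG_nil, ih1]
        simp [pvScan]
      · intro c hc
        have h2 : pvSplitNL (c :: '\n' :: ds) = [c] :: pvSplitNL ds := by
          simp [pvSplitNL, hc]
        have h3 : pvG [c] = [c] := by simp [pvG, PySem.Chars.join, List.intercalate]
        rw [h2, List.map_cons, pv_join_cons, if_neg hne, ih1, h3]
        simp [pvScan]
    · obtain ⟨h', t', hds⟩ := List.exists_cons_of_ne_nil (pvSplitNL_ne_nil ds)
      constructor
      · rw [ih2 d hd]
        simp [pvScan, hd]
      · intro c hc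
        have hsp : pvSplitNL (d :: ds) = (d :: h') :: t' := by
          simp [pvSplitNL, hd, hds]
        have hsp2 : pvSplitNL (c :: d :: ds) = (c :: d :: h') :: t' := by
          simp [pvSplitNL, hc, hd, hds]
        have key : pvG (c :: d :: h') = c :: ' ' :: pvG (d :: h') := by
          rw [pvG_cons]; simp
        have hmid := ih2 d hd
        rw [hsp, List.map_cons, pv_join_cons] at hmid
        rw [hsp2, List.map_cons, pv_join_cons, key]
        simp only [List.cons_append, List.nil_append] at hmid ⊢
        rw [hmid]
        simp [pvScan, hd]

theorem pv_main (l : List Char) :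
    PySem.Chars.join ['\n'] ((pvSplitNL l).map pvG) = pvScan l true :=
  (pv_main2 l).1

theorem pv_foldA : ∀ (xs : List (List Char)) (s : Int) (acc : List (List Char)),
    (PySem.List.enumerate xs s).foldl (fun acc p => acc ++ [pvG p.2]) acc = acc ++ xs.map pvG := by
  intro xs
  induction xs with
  | nil => simp [PySem.List.enumerate_nil]
  | cons x t ih => intro s acc; simp [PySem.List.enumerate_cons, ih]

theorem pv_foldB : ∀ (l : List Char) (acc : List Char) (ls : Bool),
    (l.foldl (fun (st : List Char × Bool) ch =>
        if ch = '\n' then (st.1 ++ ['\n'], true)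
        else ((st.1 ++ (if st.2 then [] else [' '])) ++ [ch], false)) (acc, ls)).1
      = acc ++ pvScan l ls := by
  intro l
  induction l with
  | nil => intro acc ls; simp [pvScan]
  | cons c cs ih =>
    intro acc ls
    rw [List.foldl_cons]
    by_cases hc : c = '\n'
    · subst hc
      rw [if_pos rfl, ih]
      simp [pvScan]
    · rw [if_neg hc, ih]
      cases ls <;> simp [pvScan, hc]

-- ===== VERDICT (by name: the statement is the Claim_ definition above) =====
theorem process_char_spec : Claim_equal_process_char := by
  intro data _
  unfold Spec_process_char process_char process_char_alt
  rw [pv_splitOn_eq]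
  rw [show (fun (acc : List (List Char)) (p : Int × List Char) =>
        acc ++ [PySem.Chars.join [' '] (List.map (fun c => [c]) p.2)])
      = (fun acc p => acc ++ [pvG p.2]) from rfl]
  rw [pv_foldA, List.nil_append, pv_main, pv_foldB, List.nil_append]
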